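-- pv_equiv track=rewrite | github.com/tringuyen180303/TIP102-CodePath | unit7/session2/version2/problem1.py | find_affordable_ticket
-- ===== SOURCE A (Python) =====
-- def find_affordable_ticket(prices, budget):
--     low = 0
--     high = len(prices) - 1
--     best_diff = 10000
--     best_idx = -1
--     while low <= high:
--         mid = (low + high) // 2
--         diff = budget - prices[mid]
--         if diff > 0 and best_diff > diff:
--             best_diff = diff
--             best_idx = mid
--         if prices[mid] == budget:
--             return mid
--         elif prices[mid] > budget:
--             high = mid - 1
--         else:
--             low = mid + 1
--
--     return best_idx
-- ===== SOURCE B (Python) =====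
-- def find_affordable_ticket(prices, budget):
--     # Phase 1: compute the list of midpoints the binary search visits,
--     # stopping at an exact match.
--     def trace(low, high):
--         if low > high:
--             return []
--         mid = (low + high) // 2
--         if prices[mid] == budget:
--             return [mid]
--         if prices[mid] > budget:
--             return [mid] + trace(low, mid - 1)
--         return [mid] + trace(mid + 1, high)
--
--     path = trace(0, len(prices) - 1)
--     if path and prices[path[-1]] == budget:
--         return path[-1]
--     # Phase 2: pick the visited index with the smallest positive diff,
--     # earliest visit winning ties.
--     best_diff, best_idx = 10000, -1
--     for mid in path:
--         diff = budget - prices[mid]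
--         if 0 < diff < best_diff:
--             best_diff, best_idx = diff, mid
--     return best_idx
-- ===== Notes on version B (the rewrite author's own statement) =====
-- stated objective: alternative
-- what changed: B splits A's single stateful while-loop into two phases: a pure recursive function that computes the list of midpoints the binary search visits (stopping at an exact match), followed by a separate fold over that path selecting the smallest positive budget-minus-price diff; A threads best_diff/best_idx through an imperative loop.
import Mathlib
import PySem

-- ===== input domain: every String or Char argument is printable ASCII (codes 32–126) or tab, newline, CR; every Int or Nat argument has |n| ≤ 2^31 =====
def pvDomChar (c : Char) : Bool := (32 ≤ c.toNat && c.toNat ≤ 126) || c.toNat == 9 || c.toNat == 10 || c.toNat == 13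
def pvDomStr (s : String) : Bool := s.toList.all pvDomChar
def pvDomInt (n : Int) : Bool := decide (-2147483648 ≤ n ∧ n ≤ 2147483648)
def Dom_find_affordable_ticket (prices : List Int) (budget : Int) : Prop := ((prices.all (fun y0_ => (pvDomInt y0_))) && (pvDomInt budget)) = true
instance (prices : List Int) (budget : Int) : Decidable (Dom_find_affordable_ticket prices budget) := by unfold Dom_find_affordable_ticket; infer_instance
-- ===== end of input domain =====

-- B replaces A's stateful while-loop by a pure trace-of-visited-midpoints plus a separate selection fold (alternative decomposition, same cost).
-- Indexing: the loop invariant 0 ≤ low ≤ mid ≤ high ≤ len-1 keeps every access in range, so `.getD 0` is exact here.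

-- ===== PORT A =====
def find_affordable_ticketLoop (prices : List Int) (budget : Int) (low high best_diff best_idx : Int) : Int :=
  if h : low ≤ high then
    let mid := PySem.Int.floordiv (low + high) 2
    let diff := budget - (PySem.List.pyGet? prices mid).getD 0
    let best_diff' := if 0 < diff ∧ best_diff > diff then diff else best_diff
    let best_idx' := if 0 < diff ∧ best_diff > diff then mid else best_idx
    if (PySem.List.pyGet? prices mid).getD 0 = budget then mid
    else if (PySem.List.pyGet? prices mid).getD 0 > budget then
      find_affordable_ticketLoop prices budget low (mid - 1) best_diff' best_idx'
    else
      find_affordable_ticketLoop prices budget (mid + 1) high best_diff' best_idx'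
  else best_idx
termination_by (high - low + 1).toNat
decreasing_by
  · have hb := PySem.Int.floordiv_two_mid_bounds h; omega
  · have hb := PySem.Int.floordiv_two_mid_bounds h; omega

def find_affordable_ticket (prices : List Int) (budget : Int) : Int :=
  find_affordable_ticketLoop prices budget 0 ((prices.length : Int) - 1) 10000 (-1)

-- ===== PORT B =====
-- the list of midpoints the binary search visits, stopping at an exact match
def pvTrace (prices : List Int) (budget : Int) (low high : Int) : List Int :=
  if h : low ≤ high then
    let mid := PySem.Int.floordiv (low + high) 2
    if (PySem.List.pyGet? prices mid).getD 0 = budget then [mid]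
    else if (PySem.List.pyGet? prices mid).getD 0 > budget then
      mid :: pvTrace prices budget low (mid - 1)
    else
      mid :: pvTrace prices budget (mid + 1) high
  else []
termination_by (high - low + 1).toNat
decreasing_by
  · have hb := PySem.Int.floordiv_two_mid_bounds h; omega
  · have hb := PySem.Int.floordiv_two_mid_bounds h; omega

def pvStep (prices : List Int) (budget : Int) (acc : Int × Int) (mid : Int) : Int × Int :=
  let diff := budget - (PySem.List.pyGet? prices mid).getD 0
  if 0 < diff ∧ diff < acc.1 then (diff, mid) else acc

def find_affordable_ticket_alt (prices : List Int) (budget : Int) : Int :=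
  let path := pvTrace prices budget 0 ((prices.length : Int) - 1)
  match path.getLast? with
  | some m =>
      if (PySem.List.pyGet? prices m).getD 0 = budget then m
      else (path.foldl (pvStep prices budget) (10000, -1)).2
  | none => (path.foldl (pvStep prices budget) (10000, -1)).2

-- ===== PRECONDITION & SPEC =====
def Spec_find_affordable_ticket (prices : List Int) (budget : Int) (out : Int) : Prop := out = find_affordable_ticket_alt prices budget
instance (prices : List Int) (budget : Int) (out : Int) : Decidable (Spec_find_affordable_ticket prices budget out) := by unfold Spec_find_affordable_ticket; infer_instance

-- ===== CLAIM (what is proved, stated in full; the proofs are below) =====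
def Claim_equal_find_affordable_ticket : Prop := ∀ (prices : List Int) (budget : Int), Dom_find_affordable_ticket prices budget → Spec_find_affordable_ticket prices budget (find_affordable_ticket prices budget)

-- ===== LEMMAS AND PROOFS =====

-- B's selection phase, parametrised over the fold's starting accumulator
def pvSel (prices : List Int) (budget : Int) (acc : Int × Int) (path : List Int) : Int :=
  match path.getLast? with
  | some m =>
      if (PySem.List.pyGet? prices m).getD 0 = budget then m
      else (path.foldl (pvStep prices budget) acc).2
  | none => (path.foldl (pvStep prices budget) acc).2

lemma pvSel_cons (prices : List Int) (budget : Int) (acc : Int × Int) (mid : Int) (t : List Int)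
    (hne : (PySem.List.pyGet? prices mid).getD 0 ≠ budget) :
    pvSel prices budget acc (mid :: t) = pvSel prices budget (pvStep prices budget acc mid) t := by
  cases t with
  | nil => simp [pvSel, hne]
  | cons a l => simp [pvSel, List.getLast?_cons_cons, List.foldl_cons]

lemma loop_eq_sel (prices : List Int) (budget : Int) :
    ∀ (n : Nat) (low high bd bi : Int), (high - low + 1).toNat ≤ n →
      find_affordable_ticketLoop prices budget low high bd bi =
        pvSel prices budget (bd, bi) (pvTrace prices budget low high) := by
  intro n
  induction n with
  | zero =>
    intro low high bd bi hn
    have hlt : ¬ low ≤ high := by omega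
    rw [find_affordable_ticketLoop, pvTrace]
    simp [hlt, pvSel]
  | succ n ih =>
    intro low high bd bi hn
    by_cases h : low ≤ high
    · rw [find_affordable_ticketLoop, pvTrace]
      simp only [h, dif_pos]
      have hb := PySem.Int.floordiv_two_mid_bounds h
      set mid := PySem.Int.floordiv (low + high) 2 with hmid
      set p := (PySem.List.pyGet? prices mid).getD 0 with hp
      by_cases he : p = budget
      · have he' : (PySem.List.pyGet? prices mid).getD 0 = budget := hp ▸ he
        simp [pvSel, he, he']
      · have he' : (PySem.List.pyGet? prices mid).getD 0 ≠ budget := hp ▸ he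
        have hstep : ((if 0 < budget - p ∧ bd > budget - p then budget - p else bd),
                      (if 0 < budget - p ∧ bd > budget - p then mid else bi)) =
            pvStep prices budget (bd, bi) mid := by
          simp only [pvStep, ← hp, gt_iff_lt]
          split_ifs <;> rfl
        rw [if_neg he, if_neg he]
        by_cases hg : p > budget
        · rw [if_pos hg, if_pos hg, ih low (mid - 1) _ _ (by omega),
            pvSel_cons prices budget (bd, bi) mid _ he', hstep]
        · rw [if_neg hg, if_neg hg, ih (mid + 1) high _ _ (by omega),
            pvSel_cons prices budget (bd, bi) mid _ he', hstep]
    · rw [find_affordable_ticketLoop, pvTrace]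
      simp [h, pvSel]

-- ===== VERDICT (by name: the statement is the Claim_ definition above) =====
theorem find_affordable_ticket_spec : Claim_equal_find_affordable_ticket := by
  intro prices budget _
  unfold Spec_find_affordable_ticket find_affordable_ticket find_affordable_ticket_alt
  rw [loop_eq_sel prices budget ((((prices.length : Int) - 1) - 0 + 1).toNat) 0 ((prices.length : Int) - 1) 10000 (-1) le_rfl]
  rfl
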